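-- pv_equiv track=rewrite | github.com/denislavdanailov/klivio-pipeline | klivio_scraper.py | assign_tier_and_sequence
-- ===== SOURCE A (Python) =====
-- def assign_tier_and_sequence(industry: str, source: str) -> tuple[str, str]:
--     """Определя Tier и Sequence по индустрия."""
--     industry_lower = industry.lower()
--     source_lower = source.lower()
--
--     # Online бизнеси → Tier 1
--     if any(k in source_lower for k in ["clutch", "producthunt", "indie", "g2", "linkedin"]):
--         if any(k in industry_lower for k in ["saas", "software", "tech", "dev", "app"]):
--             return "Tier1", "G1"
--         if any(k in industry_lower for k in ["agency", "seo", "content", "marketing", "design"]):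
--             return "Tier1", "G2"
--         if any(k in industry_lower for k in ["coach", "consult", "training"]):
--             return "Tier1", "G3"
--         return "Tier1", "G2"  # default за online
--
--     # Offline Tier 1
--     if any(k in industry_lower for k in ["estate", "real estate", "property", "letting", "realtor"]):
--         return "Tier1", "A"
--     if any(k in industry_lower for k in ["marketing", "digital", "it ", "msp", "managed service", "web design"]):
--         return "Tier1", "B"
--     if any(k in industry_lower for k in ["account", "mortgage", "financial", "solicitor", "legal", "insurance"]):
--         return "Tier1", "C"
--
--     # Tier 2
--     if any(k in industry_lower for k in ["dental", "physio", "health", "clinic", "hvac", "plumb", "electric", "builder", "construct"]):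
--         return "Tier2", "D"
--
--     return "Tier3", "E"
-- ===== SOURCE B (Python) =====
-- # Different decomposition: flatten all rules into one priority-tagged keyword list
-- # and do a single min-priority reduction over it (no group-wise first-match chain).
--
-- def _group(keywords, rank, result):
--     return [(k, rank, result) for k in keywords]
--
-- _ONLINE_SOURCES = ["clutch", "producthunt", "indie", "g2", "linkedin"]
--
-- _FLAT_ONLINE = (
--     _group(["saas", "software", "tech", "dev", "app"], 0, ("Tier1", "G1"))
--     + _group(["agency", "seo", "content", "marketing", "design"], 1, ("Tier1", "G2"))
--     + _group(["coach", "consult", "training"], 2, ("Tier1", "G3"))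
-- )
--
-- _FLAT_OFFLINE = (
--     _group(["estate", "real estate", "property", "letting", "realtor"], 0, ("Tier1", "A"))
--     + _group(["marketing", "digital", "it ", "msp", "managed service", "web design"], 1, ("Tier1", "B"))
--     + _group(["account", "mortgage", "financial", "solicitor", "legal", "insurance"], 2, ("Tier1", "C"))
--     + _group(["dental", "physio", "health", "clinic", "hvac", "plumb", "electric", "builder", "construct"], 3, ("Tier2", "D"))
-- )
--
--
-- def assign_tier_and_sequence(industry: str, source: str) -> tuple[str, str]:
--     industry_lower = industry.lower()
--     source_lower = source.lower()
--     if any(k in source_lower for k in _ONLINE_SOURCES):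
--         flat, default = _FLAT_ONLINE, ("Tier1", "G2")
--     else:
--         flat, default = _FLAT_OFFLINE, ("Tier3", "E")
--     best = None  # (rank, result) with minimal rank among matched keywords
--     for kw, rank, result in flat:
--         if kw in industry_lower and (best is None or rank < best[0]):
--             best = (rank, result)
--     return best[1] if best is not None else default
-- ===== Notes on version B (the rewrite author's own statement) =====
-- stated objective: alternative
-- what changed: Replaces A's ordered if-chain of group membership tests by a flat priority-tagged keyword table reduced in one pass to the minimum-priority matched keyword (collect-all-matches min-reduction instead of short-circuit first-match), with per-mode defaults.
import Mathlib
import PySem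

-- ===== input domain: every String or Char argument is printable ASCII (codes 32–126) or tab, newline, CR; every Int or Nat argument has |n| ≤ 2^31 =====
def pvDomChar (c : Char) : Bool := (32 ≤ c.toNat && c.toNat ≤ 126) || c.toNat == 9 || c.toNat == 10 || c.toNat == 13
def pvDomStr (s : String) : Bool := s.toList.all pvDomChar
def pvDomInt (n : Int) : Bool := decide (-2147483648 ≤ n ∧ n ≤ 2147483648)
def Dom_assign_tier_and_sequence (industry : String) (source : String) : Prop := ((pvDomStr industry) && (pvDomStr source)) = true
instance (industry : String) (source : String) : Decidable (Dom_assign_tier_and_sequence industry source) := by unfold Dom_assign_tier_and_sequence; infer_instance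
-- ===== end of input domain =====

-- B replaces A's ordered if-chain by a flat priority-tagged keyword table reduced in one
-- min-priority pass (collect matches, keep the minimum rank); return values identical.

-- ===== PORT A =====
def assign_tier_and_sequence (industry : String) (source : String) : String × String :=
  let industry_lower := PySem.Str.lower industry
  let source_lower := PySem.Str.lower source
  if ["clutch", "producthunt", "indie", "g2", "linkedin"].any (fun k => PySem.Str.isIn k source_lower) then
    if ["saas", "software", "tech", "dev", "app"].any (fun k => PySem.Str.isIn k industry_lower) then ("Tier1", "G1")
    else if ["agency", "seo", "content", "marketing", "design"].any (fun k => PySem.Str.isIn k industry_lower) then ("Tier1", "G2")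
    else if ["coach", "consult", "training"].any (fun k => PySem.Str.isIn k industry_lower) then ("Tier1", "G3")
    else ("Tier1", "G2")
  else if ["estate", "real estate", "property", "letting", "realtor"].any (fun k => PySem.Str.isIn k industry_lower) then ("Tier1", "A")
  else if ["marketing", "digital", "it ", "msp", "managed service", "web design"].any (fun k => PySem.Str.isIn k industry_lower) then ("Tier1", "B")
  else if ["account", "mortgage", "financial", "solicitor", "legal", "insurance"].any (fun k => PySem.Str.isIn k industry_lower) then ("Tier1", "C")
  else if ["dental", "physio", "health", "clinic", "hvac", "plumb", "electric", "builder", "construct"].any (fun k => PySem.Str.isIn k industry_lower) then ("Tier2", "D")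
  else ("Tier3", "E")

-- ===== PORT B =====
-- _group(keywords, rank, result)
def pvGroup (ks : List String) (r : Nat) (res : String × String) : List (String × Nat × (String × String)) :=
  ks.map (fun k => (k, r, res))

def pvFlatOnline : List (String × Nat × (String × String)) :=
  pvGroup ["saas", "software", "tech", "dev", "app"] 0 ("Tier1", "G1")
  ++ pvGroup ["agency", "seo", "content", "marketing", "design"] 1 ("Tier1", "G2")
  ++ pvGroup ["coach", "consult", "training"] 2 ("Tier1", "G3")

def pvFlatOffline : List (String × Nat × (String × String)) :=
  pvGroup ["estate", "real estate", "property", "letting", "realtor"] 0 ("Tier1", "A")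
  ++ pvGroup ["marketing", "digital", "it ", "msp", "managed service", "web design"] 1 ("Tier1", "B")
  ++ pvGroup ["account", "mortgage", "financial", "solicitor", "legal", "insurance"] 2 ("Tier1", "C")
  ++ pvGroup ["dental", "physio", "health", "clinic", "hvac", "plumb", "electric", "builder", "construct"] 3 ("Tier2", "D")

-- loop body: keep the matched entry of minimal rank
def pvStep (text : String) (best : Option (Nat × (String × String)))
    (e : String × Nat × (String × String)) : Option (Nat × (String × String)) :=
  if PySem.Str.isIn e.1 text && (match best with | none => true | some (r0, _) => decide (e.2.1 < r0)) then
    some (e.2.1, e.2.2)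
  else best

def assign_tier_and_sequence_alt (industry : String) (source : String) : String × String :=
  let industry_lower := PySem.Str.lower industry
  let source_lower := PySem.Str.lower source
  let (flat, dflt) :=
    if ["clutch", "producthunt", "indie", "g2", "linkedin"].any (fun k => PySem.Str.isIn k source_lower) then
      (pvFlatOnline, ("Tier1", "G2"))
    else
      (pvFlatOffline, ("Tier3", "E"))
  match flat.foldl (pvStep industry_lower) none with
  | some (_, res) => res
  | none => dflt

-- ===== PRECONDITION & SPEC =====
def Spec_assign_tier_and_sequence (industry : String) (source : String) (out : String × String) : Prop := out = assign_tier_and_sequence_alt industry source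
instance (industry : String) (source : String) (out : String × String) : Decidable (Spec_assign_tier_and_sequence industry source out) := by unfold Spec_assign_tier_and_sequence; infer_instance

-- ===== CLAIM =====
def Claim_equal_assign_tier_and_sequence : Prop := ∀ (industry : String) (source : String), Dom_assign_tier_and_sequence industry source → Spec_assign_tier_and_sequence industry source (assign_tier_and_sequence industry source)

-- ===== LEMMAS AND PROOFS =====

theorem pvStep_none (text k : String) (r : Nat) (res : String × String) :
    pvStep text none (k, r, res) = if PySem.Str.isIn k text then some (r, res) else none := by
  simp only [pvStep, Bool.and_true]

theorem pvStep_some (text k : String) (r r0 : Nat) (res res0 : String × String) (h : r0 ≤ r) :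
    pvStep text (some (r0, res0)) (k, r, res) = some (r0, res0) := by
  simp only [pvStep]
  have : decide (r < r0) = false := decide_eq_false (Nat.not_lt.mpr h)
  rw [this, Bool.and_false, if_neg]
  simp

-- folding a whole group over an already-set minimum of rank ≤ r changes nothing
theorem pvFold_group_some (text : String) (ks : List String) (r r0 : Nat)
    (res res0 : String × String) (h : r0 ≤ r) :
    (pvGroup ks r res).foldl (pvStep text) (some (r0, res0)) = some (r0, res0) := by
  induction ks with
  | nil => rfl
  | cons k ks ih =>
      rw [pvGroup, List.map_cons, List.foldl_cons, pvStep_some text k r r0 res res0 h]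
      exact ih

-- folding a group from none yields its (rank, result) iff some keyword matches
theorem pvFold_group_none (text : String) (ks : List String) (r : Nat)
    (res : String × String) :
    (pvGroup ks r res).foldl (pvStep text) none
      = if ks.any (fun k => PySem.Str.isIn k text) then some (r, res) else none := by
  induction ks with
  | nil => rfl
  | cons k ks ih =>
      rw [pvGroup, List.map_cons, List.foldl_cons, pvStep_none, List.any_cons]
      cases hb : PySem.Str.isIn k text with
      | true =>
          rw [if_pos rfl, Bool.true_or, if_pos rfl]
          exact pvFold_group_some text ks r r res res (le_refl r)
      | false =>
          rw [if_neg (by simp), Bool.false_or]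
          rw [pvGroup] at ih; exact ih

-- the general step: one group over any accumulator whose rank (if set) is ≤ r
theorem pvFold_group_acc (text : String) (ks : List String) (r : Nat) (res : String × String)
    (acc : Option (Nat × (String × String))) (h : ∀ p, acc = some p → p.1 ≤ r) :
    (pvGroup ks r res).foldl (pvStep text) acc
      = if acc.isSome then acc
        else if ks.any (fun k => PySem.Str.isIn k text) then some (r, res) else none := by
  cases acc with
  | none => rw [pvFold_group_none]; rfl
  | some p =>
      obtain ⟨r0, res0⟩ := p
      rw [pvFold_group_some text ks r r0 res res0 (h _ rfl)]
      rfl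

-- ===== VERDICT =====
theorem assign_tier_and_sequence_spec : Claim_equal_assign_tier_and_sequence := by
  intro industry source _
  unfold Spec_assign_tier_and_sequence assign_tier_and_sequence assign_tier_and_sequence_alt
  cases hs : (["clutch", "producthunt", "indie", "g2", "linkedin"].any
      (fun k => PySem.Str.isIn k (PySem.Str.lower source))) with
  | true =>
      simp only [hs, if_true]
      rw [pvFlatOnline, List.foldl_append, List.foldl_append,
        pvFold_group_none,
        pvFold_group_acc _ ["agency", "seo", "content", "marketing", "design"] 1 _ _
          (by intro p hp; repeat' split at hp
              all_goals simp_all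
              all_goals (try (obtain ⟨-, hp⟩ := hp))
              all_goals norm_num),
        pvFold_group_acc _ ["coach", "consult", "training"] 2 _ _
          (by intro p hp; repeat' split at hp
              all_goals simp_all
              all_goals (try (obtain ⟨-, hp⟩ := hp))
              all_goals norm_num)]
      split_ifs <;> simp_all
  | false =>
      simp only [hs, Bool.false_eq_true, if_false]
      rw [pvFlatOffline, List.foldl_append, List.foldl_append, List.foldl_append,
        pvFold_group_none,
        pvFold_group_acc _ ["marketing", "digital", "it ", "msp", "managed service", "web design"] 1 _ _
          (by intro p hp; repeat' split at hp
              all_goals simp_all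
              all_goals (try (obtain ⟨-, hp⟩ := hp))
              all_goals norm_num),
        pvFold_group_acc _ ["account", "mortgage", "financial", "solicitor", "legal", "insurance"] 2 _ _
          (by intro p hp; repeat' split at hp
              all_goals simp_all
              all_goals (try (obtain ⟨-, hp⟩ := hp))
              all_goals norm_num),
        pvFold_group_acc _ ["dental", "physio", "health", "clinic", "hvac", "plumb", "electric", "builder", "construct"] 3 _ _
          (by intro p hp; repeat' split at hp
              all_goals simp_all
              all_goals (try (obtain ⟨-, hp⟩ := hp))
              all_goals norm_num)]
      split_ifs <;> simp_all
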